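-- pv_equiv track=rewrite | github.com/ZhouJin862/medical_agent | skills/population-classification/scripts/population_classifier.py | _determine_groups
-- ===== SOURCE A (Python) =====
-- from typing import Dict, Any, Optional, Union, List, Tuple
--
-- GROUP_THRESHOLDS = [
--     (81, "重症"),
--     (51, "慢病"),
--     (21, "亚健康"),
--     (0,  "健康"),
-- ]
--
-- FOLLOW_UP_MAP = {
--     "健康": "每年",
--     "亚健康": "每6个月",
--     "慢病": "每3个月",
--     "重症": "每月",
-- }
--
-- def _determine_groups(total_score: int) -> Tuple[List[str], str]:
--     """Map score to a list of applicable group names and the primary follow-up interval.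
--
--     A person can belong to multiple groups. For example, if score >= 81
--     (重症), they are also classified as 慢病, 亚健康 because 重症 implies
--     all the lower-severity categories as well.
--
--     Returns (groups_list, primary_follow_up) where primary_follow_up
--     corresponds to the highest-severity group.
--     """
--     groups: List[str] = []
--     primary_group = "健康"
--     for threshold, group in GROUP_THRESHOLDS:
--         if total_score >= threshold:
--             groups.append(group)
--             if primary_group == "健康":
--                 primary_group = group
--
--     if not groups:
--         groups = ["健康"]
--
--     return groups, FOLLOW_UP_MAP[primary_group]
-- ===== SOURCE B (Python) =====
-- GROUP_THRESHOLDS = [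
--     (81, "重症"),
--     (51, "慢病"),
--     (21, "亚健康"),
--     (0,  "健康"),
-- ]
--
-- FOLLOW_UP_MAP = {
--     "健康": "每年",
--     "亚健康": "每6个月",
--     "慢病": "每3个月",
--     "重症": "每月",
-- }
--
-- def _determine_groups(total_score):
--     # Two-phase: pick the cutoff index with a range ladder, then slice the suffix.
--     if total_score >= 81:
--         i = 0
--     elif total_score >= 51:
--         i = 1
--     elif total_score >= 21:
--         i = 2
--     elif total_score >= 0:
--         i = 3
--     else:
--         return ["健康"], "每年"
--     groups = [g for _, g in GROUP_THRESHOLDS[i:]]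
--     return groups, FOLLOW_UP_MAP[groups[0]]
-- ===== Notes on version B (the rewrite author's own statement) =====
-- stated objective: simpler
-- what changed: Replaced the accumulating loop with mutable primary-group state by a two-phase form: a range ladder picks the cutoff index, then the group list is a suffix slice of GROUP_THRESHOLDS.
import Mathlib
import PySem

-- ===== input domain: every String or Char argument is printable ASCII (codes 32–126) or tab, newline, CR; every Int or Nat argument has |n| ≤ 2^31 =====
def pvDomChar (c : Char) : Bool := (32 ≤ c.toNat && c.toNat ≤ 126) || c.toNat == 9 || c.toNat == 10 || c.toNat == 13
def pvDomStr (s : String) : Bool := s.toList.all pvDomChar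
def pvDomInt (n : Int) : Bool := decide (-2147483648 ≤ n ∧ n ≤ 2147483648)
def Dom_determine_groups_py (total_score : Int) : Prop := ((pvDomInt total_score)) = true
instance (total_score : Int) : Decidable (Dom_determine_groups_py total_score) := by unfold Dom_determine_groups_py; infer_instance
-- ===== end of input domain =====

-- B replaces A's accumulating loop (with mutable primary-group state) by a range ladder
-- picking a cutoff index followed by a suffix slice; objective: simpler.

-- ===== PORT A =====
def pvGroupThresholds : List (Int × String) :=
  [(81, "重症"), (51, "慢病"), (21, "亚健康"), (0, "健康")]

def pvFollowUpMap : PySem.Dict String String :=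
  PySem.Dict.ofList [("健康", "每年"), ("亚健康", "每6个月"), ("慢病", "每3个月"), ("重症", "每月")]

def determine_groups_py (total_score : Int) : List String × String :=
  let st := pvGroupThresholds.foldl
    (fun (acc : List String × String) tg =>
      let (groups, primary) := acc
      if total_score ≥ tg.1 then
        (groups ++ [tg.2], if primary = "健康" then tg.2 else primary)
      else acc)
    ([], "健康")
  let groups := if st.1 = [] then ["健康"] else st.1
  -- FOLLOW_UP_MAP[primary]: the key is always present, so getD "" is exact here
  (groups, (pvFollowUpMap.get? st.2).getD "")

-- ===== PORT B =====
def determine_groups_py_alt (total_score : Int) : List String × String :=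
  if total_score ≥ 81 then pvAltSuffix 0
  else if total_score ≥ 51 then pvAltSuffix 1
  else if total_score ≥ 21 then pvAltSuffix 2
  else if total_score ≥ 0 then pvAltSuffix 3
  else (["健康"], "每年")
where
  -- groups = [g for _, g in GROUP_THRESHOLDS[i:]] (nonnegative slice = drop, PySem.List.slice_from_natCast);
  -- FOLLOW_UP_MAP[groups[0]]: key always present, so getD "" is exact
  pvAltSuffix (i : Nat) : List String × String :=
    let groups := (pvGroupThresholds.drop i).map (·.2)
    (groups, (pvFollowUpMap.get? (groups.headD "")).getD "")

-- ===== PRECONDITION & SPEC =====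
def Spec_determine_groups_py (total_score : Int) (out : List String × String) : Prop := out = determine_groups_py_alt total_score
instance (total_score : Int) (out : List String × String) : Decidable (Spec_determine_groups_py total_score out) := by unfold Spec_determine_groups_py; infer_instance

-- ===== CLAIM (what is proved, stated in full; the proofs are below) =====
def Claim_equal_determine_groups_py : Prop := ∀ (total_score : Int), Dom_determine_groups_py total_score → Spec_determine_groups_py total_score (determine_groups_py total_score)

-- ===== LEMMAS AND PROOFS =====

-- ===== VERDICT (by name: the statement is the Claim_ definition above) =====
theorem determine_groups_py_spec : Claim_equal_determine_groups_py := by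
  intro s _
  unfold Spec_determine_groups_py determine_groups_py determine_groups_py_alt
  by_cases h81 : s ≥ 81
  · have h51 : s ≥ 51 := by omega
    have h21 : s ≥ 21 := by omega
    have h0 : s ≥ 0 := by omega
    simp [pvGroupThresholds, determine_groups_py_alt.pvAltSuffix, pvFollowUpMap, h81, h51, h21, h0]
  · by_cases h51 : s ≥ 51
    · have h21 : s ≥ 21 := by omega
      have h0 : s ≥ 0 := by omega
      simp [pvGroupThresholds, determine_groups_py_alt.pvAltSuffix, pvFollowUpMap, h81, h51, h21, h0]
    · by_cases h21 : s ≥ 21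
      · have h0 : s ≥ 0 := by omega
        simp [pvGroupThresholds, determine_groups_py_alt.pvAltSuffix, pvFollowUpMap, h81, h51, h21, h0]
      · by_cases h0 : s ≥ 0
        · simp [pvGroupThresholds, determine_groups_py_alt.pvAltSuffix, pvFollowUpMap, h81, h51, h21, h0]
        · simp [pvGroupThresholds, pvFollowUpMap, h81, h51, h21, h0]
          decide
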